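-- pv_equiv track=rewrite | github.com/morgoth1145/advent-of-code | 2020/Day 20/solution.py | all_grid_options
-- ===== SOURCE A (Python) =====
-- def grid_mirrors(grid):
--     candidates = [grid]
--     candidates.append(grid[::-1])
--     candidates.append([l[::-1] for l in grid])
--     candidates.append([l[::-1] for l in grid][::-1])
--     return candidates
--
-- def grid_rotations(grid):
--     candidates = [grid]
--     last = grid
--     for _ in range(3):
--         grid = [l[:] for l in grid]
--         for x in range(len(grid)):
--             for y in range(len(grid[x])):
--                 grid[x][y] = last[len(grid[x])-y-1][x]
--         last = grid
--         candidates.append(grid)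
--     return candidates
--
-- def all_grid_options(grid):
--     candidates = list()
--     for opt in grid_mirrors(grid):
--         candidates.extend(grid_rotations(opt))
--     output = []
--     for opt in candidates:
--         if opt not in output:
--             output.append(opt)
--     return output
-- ===== SOURCE B (Python) =====
-- def all_grid_options(grid):
--     # Simpler: two seeds (grid and grid[::-1]) rotated four times each cover the
--     # whole dihedral orbit in A's first-seen order; dedup is done inline.
--     def rot90(g):
--         return [[g[len(row) - y - 1][x] for y in range(len(row))] for x, row in enumerate(g)]
--     output = []
--     for seed in (grid, grid[::-1]):
--         g = seed
--         for _ in range(4):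
--             if g not in output:
--                 output.append(g)
--             g = rot90(g)
--     return output
-- ===== Notes on version B (the rewrite author's own statement) =====
-- stated objective: simpler
-- what changed: B drops the 4-mirror helper and the 16-candidate buffer: it takes just two seeds (grid and grid[::-1]), rotates each four times with the same index formula, and deduplicates inline while emitting, producing the identical 8-element dihedral orbit in A's first-seen order.
-- outside the precondition, e.g. on all_grid_options([[]]): A returns [[[]]], B returns [[[]]]; on all_grid_options([[], []]): A returns [[[], []]], B returns [[[], []]]
import Mathlib
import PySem

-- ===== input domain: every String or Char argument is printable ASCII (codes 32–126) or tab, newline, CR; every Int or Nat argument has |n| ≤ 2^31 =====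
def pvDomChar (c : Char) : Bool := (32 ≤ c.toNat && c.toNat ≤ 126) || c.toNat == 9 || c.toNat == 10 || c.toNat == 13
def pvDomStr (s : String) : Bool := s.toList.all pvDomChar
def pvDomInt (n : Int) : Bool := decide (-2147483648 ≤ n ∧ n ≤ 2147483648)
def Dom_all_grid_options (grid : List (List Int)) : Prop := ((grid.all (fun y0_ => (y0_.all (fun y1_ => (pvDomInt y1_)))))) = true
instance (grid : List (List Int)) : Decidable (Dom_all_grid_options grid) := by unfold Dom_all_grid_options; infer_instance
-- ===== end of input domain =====

-- B replaces A's 4-mirror × 4-rotation enumeration (16 candidates, then a dedup pass)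
-- by two seeds (grid and its reverse) rotated four times each with inline dedup — simpler,
-- same output on every square grid (Pre_ restricts to square grids; elsewhere A mostly raises).


-- ===== PORT A =====
-- grid[x][y] with Python index semantics; the defaults are never reached on inputs
-- admitted by Pre_ (all indices in range there).
def pvCell (g : List (List Int)) (i j : Int) : Int :=
  PySem.List.pyGetD (PySem.List.pyGetD g i []) j 0

-- the body of A's triple loop: a fresh copy whose every entry is overwritten with
-- last[len(grid[x])-y-1][x]
def pvRotStep (last : List (List Int)) : List (List Int) :=
  (PySem.List.enumerate last).map (fun p =>
    (PySem.List.enumerate p.2).map (fun q =>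
      pvCell last ((p.2.length : Int) - q.1 - 1) p.1))

def grid_rotations (grid : List (List Int)) : List (List (List Int)) :=
  ((List.range 3).foldl (fun (st : List (List (List Int)) × List (List Int)) _ =>
    (st.1 ++ [pvRotStep st.2], pvRotStep st.2)) ([grid], grid)).1

-- grid[::-1] ported as List.reverse (exact); [l[::-1] for l in grid] as map List.reverse
def grid_mirrors (grid : List (List Int)) : List (List (List Int)) :=
  [grid, grid.reverse, grid.map List.reverse, (grid.map List.reverse).reverse]

def all_grid_options (grid : List (List Int)) : List (List (List Int)) :=
  let candidates := (grid_mirrors grid).foldl (fun acc opt => acc ++ grid_rotations opt) []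
  candidates.foldl (fun out opt => if opt ∈ out then out else out ++ [opt]) []

-- ===== PORT B =====
-- B's rot90 comprehension: [[g[len(row)-y-1][x] for y in range(len(row))] for x,row in enumerate(g)]
def pvRot90 (g : List (List Int)) : List (List Int) :=
  (PySem.List.enumerate g).map (fun p =>
    (PySem.List.pyRange 0 (p.2.length : Int) 1).map (fun y =>
      pvCell g ((p.2.length : Int) - y - 1) p.1))

def all_grid_options_alt (grid : List (List Int)) : List (List (List Int)) :=
  [grid, grid.reverse].foldl (fun output seed =>
    (((List.range 4).foldl (fun (st : List (List (List Int)) × List (List Int)) _ =>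
      ((if st.2 ∈ st.1 then st.1 else st.1 ++ [st.2]), pvRot90 st.2)) (output, seed)).1)) []

-- ===== PRECONDITION & SPEC =====
-- Pre_ restricts to square grids (every row as long as the grid has rows): on non-square
-- grids the rotation's index formula goes out of range — A raises IndexError on most of
-- them, and whether it returns at all depends on negative-index wraparound accidents with
-- no closed form; B behaves the same way there but equality is only claimed on squares.
def Pre_all_grid_options (grid : List (List Int)) : Prop :=
  ∀ row ∈ grid, row.length = grid.length
instance (grid : List (List Int)) : Decidable (Pre_all_grid_options grid) := by
  unfold Pre_all_grid_options; infer_instance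

def pvWitness_all_grid_options : List (List Int) := [[1, 2], [3, 4]]

def Spec_all_grid_options (grid : List (List Int)) (out : List (List (List Int))) : Prop := out = all_grid_options_alt grid
instance (grid : List (List Int)) (out : List (List (List Int))) : Decidable (Spec_all_grid_options grid out) := by unfold Spec_all_grid_options; infer_instance

-- ===== CLAIM (what is proved, stated in full; the proofs are below) =====
def Claim_equal_all_grid_options : Prop := ∀ (grid : List (List Int)), Dom_all_grid_options grid → Pre_all_grid_options grid → Spec_all_grid_options grid (all_grid_options grid)

-- ===== LEMMAS AND PROOFS =====

-- square grid of side n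
def pvSq (n : Nat) (g : List (List Int)) : Prop := g.length = n ∧ ∀ r ∈ g, r.length = n

-- Nat-indexed cell access
def pvCN (g : List (List Int)) (i j : Nat) : Int := (g.getD i []).getD j 0

-- the dedup fold shared by both ports
def pvDedup (l : List (List (List Int))) (out : List (List (List Int))) : List (List (List Int)) :=
  l.foldl (fun out opt => if opt ∈ out then out else out ++ [opt]) out

theorem pvCell_natCast (g : List (List Int)) (i j : Nat) :
    pvCell g (i : Int) (j : Int) = pvCN g i j := by
  simp [pvCell, pvCN, PySem.List.pyGetD_natCast]

theorem pvCN_eq (g : List (List Int)) (i j : Nat) (hi : i < g.length)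
    (hj : j < g[i].length) : pvCN g i j = g[i][j] := by
  simp [pvCN, List.getD_eq_getElem?_getD, hi, hj]

theorem pvSq_ext {n : Nat} {g h : List (List Int)} (hg : pvSq n g) (hh : pvSq n h)
    (hc : ∀ i j, i < n → j < n → pvCN g i j = pvCN h i j) : g = h := by
  obtain ⟨hgl, hgr⟩ := hg
  obtain ⟨hhl, hhr⟩ := hh
  apply List.ext_getElem (by omega)
  intro i hi _
  have hri : g[i].length = n := hgr _ (List.getElem_mem hi)
  have hri' : h[i].length = n := hhr _ (List.getElem_mem (by omega))
  apply List.ext_getElem (by omega)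
  intro j hj _
  have h1 := pvCN_eq g i j (by omega) (by omega)
  have h2 := pvCN_eq h i j (by omega) (by omega)
  rw [← h1, ← h2]
  exact hc i j (by omega) (by omega)

theorem pvSq_rotStep {n : Nat} {g : List (List Int)} (hg : pvSq n g) : pvSq n (pvRotStep g) := by
  obtain ⟨hgl, hgr⟩ := hg
  constructor
  · simp [pvRotStep, PySem.List.length_enumerate, hgl]
  · intro r hr
    simp only [pvRotStep, List.mem_map] at hr
    obtain ⟨p, hp, rfl⟩ := hr
    rw [PySem.List.mem_enumerate_iff] at hp
    obtain ⟨k, hk, rfl⟩ := hp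
    simp [PySem.List.length_enumerate]
    exact hgr _ (List.getElem_mem hk)

theorem pvCN_rotStep {n : Nat} {g : List (List Int)} (hg : pvSq n g) {i j : Nat}
    (hi : i < n) (hj : j < n) : pvCN (pvRotStep g) i j = pvCN g (n - 1 - j) i := by
  obtain ⟨hgl, hgr⟩ := hg
  have hi' : i < g.length := by omega
  have hrl : g[i].length = n := hgr _ (List.getElem_mem hi')
  have hj' : j < g[i].length := by omega
  simp only [pvCN, pvRotStep, List.getD_eq_getElem?_getD, List.getElem?_map,
    PySem.List.getElem?_enumerate, List.getElem?_eq_getElem hi', List.getElem?_eq_getElem hj',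
    Option.map_some, Option.getD_some]
  have hcast : ((g[i].length : Int) - ((0 : Int) + (j : Int)) - 1) = (((n - 1 - j : Nat)) : Int) := by
    rw [hrl]; omega
  rw [hcast, zero_add]
  rw [pvCell_natCast]
  rfl

theorem pvSq_rot90 {n : Nat} {g : List (List Int)} (hg : pvSq n g) : pvSq n (pvRot90 g) := by
  obtain ⟨hgl, hgr⟩ := hg
  constructor
  · simp [pvRot90, PySem.List.length_enumerate, hgl]
  · intro r hr
    simp only [pvRot90, List.mem_map] at hr
    obtain ⟨p, hp, rfl⟩ := hr
    rw [PySem.List.mem_enumerate_iff] at hp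
    obtain ⟨k, hk, rfl⟩ := hp
    simp
    exact hgr _ (List.getElem_mem hk)

theorem pvCN_rot90 {n : Nat} {g : List (List Int)} (hg : pvSq n g) {i j : Nat}
    (hi : i < n) (hj : j < n) : pvCN (pvRot90 g) i j = pvCN g (n - 1 - j) i := by
  obtain ⟨hgl, hgr⟩ := hg
  have hi' : i < g.length := by omega
  have hrl : g[i].length = n := hgr _ (List.getElem_mem hi')
  have hj' : j < g[i].length := by omega
  simp only [pvCN, pvRot90, List.getD_eq_getElem?_getD, List.getElem?_map,
    PySem.List.getElem?_enumerate, List.getElem?_eq_getElem hi',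
    PySem.List.getElem?_map_pyRange_zero _ _ _ hj', Option.map_some, Option.getD_some]
  have hcast : ((g[i].length : Int) - (j : Int) - 1) = (((n - 1 - j : Nat)) : Int) := by
    rw [hrl]; omega
  rw [hcast, zero_add, pvCell_natCast]
  rfl

theorem pvRot90_eq_rotStep {n : Nat} {g : List (List Int)} (hg : pvSq n g) :
    pvRot90 g = pvRotStep g := by
  apply pvSq_ext (pvSq_rot90 hg) (pvSq_rotStep hg)
  intro i j hi hj
  rw [pvCN_rot90 hg hi hj, pvCN_rotStep hg hi hj]

theorem pvSq_reverse {n : Nat} {g : List (List Int)} (hg : pvSq n g) : pvSq n g.reverse := by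
  obtain ⟨hgl, hgr⟩ := hg
  exact ⟨by simpa using hgl, fun r hr => hgr r (List.mem_reverse.mp hr)⟩

theorem pvSq_mapRev {n : Nat} {g : List (List Int)} (hg : pvSq n g) :
    pvSq n (g.map List.reverse) := by
  obtain ⟨hgl, hgr⟩ := hg
  constructor
  · simpa using hgl
  · intro r hr
    simp only [List.mem_map] at hr
    obtain ⟨s, hs, rfl⟩ := hr
    simpa using hgr s hs

theorem pvCN_reverse {n : Nat} {g : List (List Int)} (hg : pvSq n g) {i : Nat} (j : Nat)
    (hi : i < n) : pvCN g.reverse i j = pvCN g (n - 1 - i) j := by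
  obtain ⟨hgl, hgr⟩ := hg
  have hi' : i < g.reverse.length := by simp; omega
  unfold pvCN
  have h1 : g.reverse.getD i [] = g[g.length - 1 - i] := by
    rw [List.getD_eq_getElem?_getD, List.getElem?_eq_getElem hi', Option.getD_some,
      List.getElem_reverse]
  have h2 : g.getD (n - 1 - i) [] = g[g.length - 1 - i] := by
    rw [List.getD_eq_getElem?_getD,
      List.getElem?_eq_getElem (show n - 1 - i < g.length by omega), Option.getD_some]
    congr 1
    omega
  rw [h1, h2]

theorem pvCN_mapRev {n : Nat} {g : List (List Int)} (hg : pvSq n g) {i j : Nat}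
    (hi : i < n) (hj : j < n) : pvCN (g.map List.reverse) i j = pvCN g i (n - 1 - j) := by
  obtain ⟨hgl, hgr⟩ := hg
  have hi' : i < g.length := by omega
  have hrl : g[i].length = n := hgr _ (List.getElem_mem hi')
  unfold pvCN
  have h1 : (g.map List.reverse).getD i [] = g[i].reverse := by
    rw [List.getD_eq_getElem?_getD, List.getElem?_map, List.getElem?_eq_getElem hi']
    rfl
  have h2 : g.getD i [] = g[i] := by
    rw [List.getD_eq_getElem?_getD, List.getElem?_eq_getElem hi', Option.getD_some]
  rw [h1, h2, List.getD_eq_getElem?_getD,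
    List.getElem?_eq_getElem (show j < g[i].reverse.length by simp; omega), Option.getD_some,
    List.getElem_reverse, List.getD_eq_getElem?_getD,
    List.getElem?_eq_getElem (show n - 1 - j < g[i].length by omega), Option.getD_some]
  congr 1
  omega

-- the three dihedral identities that make A's last eight candidates duplicates
theorem pvR4 {n : Nat} {g : List (List Int)} (hg : pvSq n g) :
    pvRotStep (pvRotStep (pvRotStep (pvRotStep g))) = g := by
  have h1 := pvSq_rotStep hg
  have h2 := pvSq_rotStep h1
  have h3 := pvSq_rotStep h2
  apply pvSq_ext (pvSq_rotStep h3) hg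
  intro i j hi hj
  rw [pvCN_rotStep h3 hi hj, pvCN_rotStep h2 (by omega) hi, pvCN_rotStep h1 (by omega) (by omega),
    pvCN_rotStep hg (by omega) (by omega)]
  congr 1 <;> omega

theorem pvH_eq {n : Nat} {g : List (List Int)} (hg : pvSq n g) :
    g.map List.reverse = pvRotStep (pvRotStep g.reverse) := by
  have hV := pvSq_reverse hg
  have hRV := pvSq_rotStep hV
  apply pvSq_ext (pvSq_mapRev hg) (pvSq_rotStep hRV)
  intro i j hi hj
  rw [pvCN_mapRev hg hi hj, pvCN_rotStep hRV hi hj, pvCN_rotStep hV (by omega) hi,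
    pvCN_reverse hg (n - 1 - j) (by omega)]
  congr 1
  omega

theorem pvVH_eq {n : Nat} {g : List (List Int)} (hg : pvSq n g) :
    (g.map List.reverse).reverse = pvRotStep (pvRotStep g) := by
  have hR := pvSq_rotStep hg
  apply pvSq_ext (pvSq_reverse (pvSq_mapRev hg)) (pvSq_rotStep hR)
  intro i j hi hj
  rw [pvCN_reverse (pvSq_mapRev hg) j hi, pvCN_mapRev hg (by omega) hj,
    pvCN_rotStep hR hi hj, pvCN_rotStep hg (by omega) hi]

-- unfolding the ports
theorem grid_rotations_eq (g : List (List Int)) :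
    grid_rotations g = [g, pvRotStep g, pvRotStep (pvRotStep g),
      pvRotStep (pvRotStep (pvRotStep g))] := rfl

theorem all_grid_options_eq (g : List (List Int)) :
    all_grid_options g =
      pvDedup (grid_rotations ((g.map List.reverse).reverse))
        (pvDedup (grid_rotations (g.map List.reverse))
          (pvDedup (grid_rotations g.reverse) (pvDedup (grid_rotations g) []))) := by
  simp only [all_grid_options, grid_mirrors, pvDedup, List.foldl_cons, List.foldl_nil,
    List.nil_append, List.foldl_append]

theorem all_grid_options_alt_eq (g : List (List Int)) :
    all_grid_options_alt g =
      pvDedup [g.reverse, pvRot90 g.reverse, pvRot90 (pvRot90 g.reverse),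
          pvRot90 (pvRot90 (pvRot90 g.reverse))]
        (pvDedup [g, pvRot90 g, pvRot90 (pvRot90 g), pvRot90 (pvRot90 (pvRot90 g))] []) := by
  simp only [all_grid_options_alt, pvDedup, List.range_succ, List.range_zero,
    List.foldl_append, List.foldl_cons, List.foldl_nil, List.nil_append]

-- dedup-fold lemmas
theorem mem_pvDedup_of_mem_out {x : List (List Int)} {l out : List (List (List Int))}
    (h : x ∈ out) : x ∈ pvDedup l out := by
  induction l generalizing out with
  | nil => exact h
  | cons y l ih =>
    simp only [pvDedup, List.foldl_cons]
    apply ih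
    split
    · exact h
    · exact List.mem_append_left _ h

theorem mem_pvDedup_of_mem {x : List (List Int)} {l out : List (List (List Int))}
    (h : x ∈ l) : x ∈ pvDedup l out := by
  induction l generalizing out with
  | nil => simp at h
  | cons y l ih =>
    simp only [pvDedup, List.foldl_cons]
    rcases List.mem_cons.mp h with rfl | hx
    · apply mem_pvDedup_of_mem_out
      split
      · assumption
      · simp
    · exact ih hx

theorem pvDedup_of_sub {l out : List (List (List Int))}
    (h : ∀ x ∈ l, x ∈ out) : pvDedup l out = out := by
  induction l with
  | nil => rfl
  | cons y l ih =>
    simp only [pvDedup, List.foldl_cons]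
    rw [if_pos (h y (by simp))]
    exact ih fun x hx => h x (by simp [hx])

theorem pvDedup_two_sub {l1 l2 out : List (List (List Int))}
    (h1 : ∀ x ∈ l1, x ∈ out) (h2 : ∀ x ∈ l2, x ∈ out) :
    pvDedup l2 (pvDedup l1 out) = out := by
  rw [pvDedup_of_sub h1, pvDedup_of_sub h2]

-- ===== VERDICT (by name: the statement is the Claim_ definition above) =====
set_option maxHeartbeats 2000000 in
theorem all_grid_options_spec : Claim_equal_all_grid_options := by
  intro grid _ hpre
  unfold Spec_all_grid_options
  have hsq : pvSq grid.length grid := ⟨rfl, hpre⟩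
  set n := grid.length with hn
  have hV : pvSq n grid.reverse := pvSq_reverse hsq
  have hRg := pvSq_rotStep hsq
  have hR2g := pvSq_rotStep hRg
  have hRV := pvSq_rotStep hV
  have hR2V := pvSq_rotStep hRV
  -- rewrite B in terms of A's rotation
  rw [all_grid_options_alt_eq,
    pvRot90_eq_rotStep hsq, pvRot90_eq_rotStep hRg, pvRot90_eq_rotStep hR2g,
    pvRot90_eq_rotStep hV, pvRot90_eq_rotStep hRV, pvRot90_eq_rotStep hR2V]
  rw [all_grid_options_eq, grid_rotations_eq, grid_rotations_eq, grid_rotations_eq,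
    grid_rotations_eq, pvVH_eq hsq, pvH_eq hsq, pvR4 hV, pvR4 hsq]
  apply pvDedup_two_sub
  · intro x hx
    apply mem_pvDedup_of_mem
    simp only [List.mem_cons, List.not_mem_nil, or_false] at hx ⊢
    tauto
  · intro x hx
    apply mem_pvDedup_of_mem_out
    apply mem_pvDedup_of_mem
    simp only [List.mem_cons, List.not_mem_nil, or_false] at hx ⊢
    tauto
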